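-- pv_equiv track=rewrite | github.com/mortsnedlaw/no-country-for-old-priors | no-country-for-old-priors/no_country_for_old_priors/analysis.py | aggregate_by_user_modality
-- ===== SOURCE A (Python) =====
-- from typing import List, Dict, Optional, Tuple
--
-- def aggregate_by_user_modality(events: List[Dict]) -> Dict[str, Dict[str, int]]:
--     """Count retrieves by user and modality"""
--     counts = {}
--     for event in events:
--         username = event.get("username", "Unknown")
--         modality = event.get("modality", "Unknown")
--         if username and modality:
--             if username not in counts:
--                 counts[username] = {}
--             counts[username][modality] = counts[username].get(modality, 0) + 1
--     return counts
-- ===== SOURCE B (Python) =====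
-- from collections import Counter
--
-- def aggregate_by_user_modality(events):
--     """Count retrieves by user and modality"""
--     pairs = [(e.get("username", "Unknown"), e.get("modality", "Unknown")) for e in events]
--     kept = [(u, m) for (u, m) in pairs if u and m]
--     result = {}
--     for (u, m), c in Counter(kept).items():
--         result.setdefault(u, {})[m] = c
--     return result
-- ===== Notes on version B (the rewrite author's own statement) =====
-- stated objective: alternative
-- what changed: B replaces A's single loop that mutates a nested dict per event by a three-stage pipeline: collect the guarded (username, modality) pairs, count them with collections.Counter, then reshape the counter items into the nested dict.
import Mathlib
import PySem

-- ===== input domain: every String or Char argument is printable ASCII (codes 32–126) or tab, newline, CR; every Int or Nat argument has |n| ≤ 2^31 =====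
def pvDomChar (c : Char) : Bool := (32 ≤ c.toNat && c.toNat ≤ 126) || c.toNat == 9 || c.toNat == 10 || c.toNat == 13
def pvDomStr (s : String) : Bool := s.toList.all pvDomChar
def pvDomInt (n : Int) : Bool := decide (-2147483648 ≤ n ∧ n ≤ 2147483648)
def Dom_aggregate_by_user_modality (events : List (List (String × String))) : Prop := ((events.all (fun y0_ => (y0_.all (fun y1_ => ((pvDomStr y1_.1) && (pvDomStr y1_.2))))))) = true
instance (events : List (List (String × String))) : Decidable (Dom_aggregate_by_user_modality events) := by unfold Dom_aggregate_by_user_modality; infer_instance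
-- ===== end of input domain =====

-- ===== PORT A =====
-- B reorganises A's single nested-dict-updating loop into collect-pairs / Counter / reshape; alternative decomposition, same cost.
-- shared helper: event.get(key, default) on a Python dict built from the association list
def pvGetD (e : List (String × String)) (k dflt : String) : String :=
  (PySem.Dict.ofList e).getD k dflt

-- loop body of A (the for-loop over events)
def pvStepA (counts : PySem.Dict String (PySem.Dict String Int))
    (event : List (String × String)) : PySem.Dict String (PySem.Dict String Int) :=
  let username := pvGetD event "username" "Unknown"
  let modality := pvGetD event "modality" "Unknown"
  if username ≠ "" ∧ modality ≠ "" then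
    let counts :=
      if counts.contains username then counts
      else counts.insert username PySem.Dict.empty
    counts.insert username
      ((counts.getD username PySem.Dict.empty).insert modality
        ((counts.getD username PySem.Dict.empty).getD modality 0 + 1))
  else counts

def aggregate_by_user_modality (events : List (List (String × String))) :
    List (String × List (String × Int)) :=
  (events.foldl pvStepA PySem.Dict.empty).items.map (fun p => (p.1, p.2.items))

-- ===== PORT B =====
-- the two comprehensions of B: collect pairs, keep the guarded ones
def pvPairs (events : List (List (String × String))) : List (String × String) :=
  (events.map (fun e => (pvGetD e "username" "Unknown", pvGetD e "modality" "Unknown"))).filter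
    (fun q => q.1 ≠ "" ∧ q.2 ≠ "")

-- loop body of B's reshape loop: result.setdefault(u, {})[m] = c
def pvStepB (res : PySem.Dict String (PySem.Dict String Int))
    (qc : (String × String) × Int) : PySem.Dict String (PySem.Dict String Int) :=
  let r1 := res.setdefault qc.1.1 PySem.Dict.empty
  r1.insert qc.1.1 ((r1.getD qc.1.1 PySem.Dict.empty).insert qc.1.2 qc.2)

def aggregate_by_user_modality_alt (events : List (List (String × String))) :
    List (String × List (String × Int)) :=
  ((PySem.Dict.counter (pvPairs events)).items.foldl pvStepB PySem.Dict.empty).items.map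
    (fun p => (p.1, p.2.items))

-- ===== PRECONDITION & SPEC =====
def Spec_aggregate_by_user_modality (events : List (List (String × String))) (out : List (String × List (String × Int))) : Prop := out = aggregate_by_user_modality_alt events
instance (events : List (List (String × String))) (out : List (String × List (String × Int))) : Decidable (Spec_aggregate_by_user_modality events out) := by unfold Spec_aggregate_by_user_modality; infer_instance

-- ===== CLAIM (what is proved, stated in full; the proofs are below) =====
def Claim_equal_aggregate_by_user_modality : Prop := ∀ (events : List (List (String × String))), Dom_aggregate_by_user_modality events → Spec_aggregate_by_user_modality events (aggregate_by_user_modality events)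

-- ===== LEMMAS AND PROOFS =====
-- inserts at two different keys commute when the first key is already present
theorem pv_insert_comm {κ ν : Type} [BEq κ] [LawfulBEq κ]
    (d : PySem.Dict κ ν) (k k' : κ) (v w : ν)
    (hk : d.contains k = true) (hne : k' ≠ k) :
    (d.insert k v).insert k' w = (d.insert k' w).insert k v := by
  apply PySem.Dict.ext
  by_cases h' : d.contains k' = true
  · rw [PySem.Dict.items_insert_of_contains _ _ (by simp [PySem.Dict.contains_insert, h']),
      PySem.Dict.items_insert_of_contains _ _ hk,
      PySem.Dict.items_insert_of_contains _ _ (by simp [PySem.Dict.contains_insert, hk]),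
      PySem.Dict.items_insert_of_contains _ _ h']
    simp only [List.map_map]
    apply List.map_congr_left
    intro p _
    by_cases h1 : p.1 = k <;> by_cases h2 : p.1 = k' <;>
      simp_all [Function.comp, Ne.symm hne]
  · have h'f : d.contains k' = false := by simpa using h'
    rw [PySem.Dict.items_insert_of_not_contains _ _
        (by simp [PySem.Dict.contains_insert, h'f, hne]),
      PySem.Dict.items_insert_of_contains _ _ hk,
      PySem.Dict.items_insert_of_contains _ _ (by simp [PySem.Dict.contains_insert, hk]),
      PySem.Dict.items_insert_of_not_contains _ _ h'f]
    simp
    exact fun h => absurd h hne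

def pvF (d : PySem.Dict String (PySem.Dict String Int)) (p : String × String) :
    PySem.Dict String (PySem.Dict String Int) :=
  d.insert p.1 ((d.getD p.1 PySem.Dict.empty).insert p.2
    ((d.getD p.1 PySem.Dict.empty).getD p.2 0 + 1))

def pvG (d : PySem.Dict String (PySem.Dict String Int)) (qc : (String × String) × Int) :
    PySem.Dict String (PySem.Dict String Int) :=
  d.insert qc.1.1 ((d.getD qc.1.1 PySem.Dict.empty).insert qc.1.2 qc.2)

-- no entry for (u,m) in l → the (u,m) lookup of the fold is the lookup of acc
theorem pv_lookup_none (l : List ((String × String) × Int)) (u m : String) :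
    ∀ (acc : PySem.Dict String (PySem.Dict String Int)),
    (∀ q ∈ l, q.1 ≠ (u, m)) →
    ((l.foldl pvG acc).getD u PySem.Dict.empty).get? m
      = (acc.getD u PySem.Dict.empty).get? m := by
  induction l with
  | nil => intro acc _; rfl
  | cons q l ih =>
    intro acc h
    rw [List.foldl_cons, ih _ (fun q' hq' => h q' (List.mem_cons_of_mem _ hq'))]
    show ((acc.insert q.1.1 _).getD u _).get? m = _
    by_cases h1 : u = q.1.1
    · subst h1
      rw [PySem.Dict.getD_insert_self, PySem.Dict.get?_insert_of_ne]
      intro hm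
      exact h q List.mem_cons_self (by rw [hm])
    · rw [PySem.Dict.getD_insert_of_ne _ _ _ h1]

-- unique entry ((u,m),c) in l → the (u,m) lookup of the fold is c
theorem pv_lookup_some (l : List ((String × String) × Int)) (u m : String) (c : Int) :
    ∀ (acc : PySem.Dict String (PySem.Dict String Int)),
    (l.map (·.1)).Nodup → ((u, m), c) ∈ l →
    ((l.foldl pvG acc).getD u PySem.Dict.empty).get? m = some c := by
  induction l with
  | nil => intro _ _ hm; cases hm
  | cons q l ih =>
    intro acc hnd hm
    rw [List.map_cons, List.nodup_cons] at hnd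
    rcases List.mem_cons.mp hm with h | h
    · subst h
      rw [List.foldl_cons,
        pv_lookup_none l u m _ (fun q' hq' hq1 => hnd.1 (hq1 ▸ List.mem_map_of_mem (f := fun x => x.1) hq'))]
      show (((acc.insert u ((acc.getD u PySem.Dict.empty).insert m c))).getD u
          PySem.Dict.empty).get? m = some c
      rw [PySem.Dict.getD_insert_self, PySem.Dict.get?_insert_self]
    · rw [List.foldl_cons]; exact ih _ hnd.2 h

-- bumping an existing inner entry before the fold = bumping it after the fold,
-- provided no later step touches exactly (u, m)
theorem pv_prop (l : List ((String × String) × Int)) (u m : String) (v : Int) :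
    ∀ (acc : PySem.Dict String (PySem.Dict String Int)),
    acc.contains u = true →
    ((acc.getD u PySem.Dict.empty).contains m) = true →
    (∀ q ∈ l, q.1 ≠ (u, m)) →
    l.foldl pvG (acc.insert u ((acc.getD u PySem.Dict.empty).insert m v))
      = (l.foldl pvG acc).insert u
          (((l.foldl pvG acc).getD u PySem.Dict.empty).insert m v) := by
  induction l with
  | nil => intro acc _ _ _; rfl
  | cons q l ih =>
    intro acc hu hm hq
    have hq1 : q.1 ≠ (u, m) := hq q List.mem_cons_self
    rw [List.foldl_cons, List.foldl_cons]
    have hstep : pvG (acc.insert u ((acc.getD u PySem.Dict.empty).insert m v)) q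
        = (pvG acc q).insert u (((pvG acc q).getD u PySem.Dict.empty).insert m v) := by
      simp only [pvG]
      by_cases h1 : q.1.1 = u
      · have hm2 : q.1.2 ≠ m := fun h2 => hq1 (by rw [← h1, ← h2])
        rw [h1, PySem.Dict.getD_insert_self, PySem.Dict.getD_insert_self,
          PySem.Dict.insert_insert_self, PySem.Dict.insert_insert_self,
          pv_insert_comm _ m q.1.2 _ _ hm hm2]
      · rw [PySem.Dict.getD_insert_of_ne _ _ _ h1,
          PySem.Dict.getD_insert_of_ne _ _ _ (fun h => h1 h.symm),
          pv_insert_comm _ u q.1.1 _ _ hu h1]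
    rw [hstep]
    apply ih
    · show ((acc.insert q.1.1 _).contains u) = true
      rw [PySem.Dict.contains_insert]
      simp [hu]
    · show (((acc.insert q.1.1 _).getD u PySem.Dict.empty).contains m) = true
      by_cases h1 : u = q.1.1
      · subst h1
        rw [PySem.Dict.getD_insert_self, PySem.Dict.contains_insert]
        simp [hm]
      · rw [PySem.Dict.getD_insert_of_ne _ _ _ h1]
        exact hm
    · exact fun q' hq' => hq q' (List.mem_cons_of_mem _ hq')

-- replacing the unique ((u,m),c) entry by ((u,m),c+1) = inserting the bump after the fold
theorem pv_mut (l : List ((String × String) × Int)) (u m : String) (c : Int) :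
    ∀ (acc : PySem.Dict String (PySem.Dict String Int)),
    (l.map (·.1)).Nodup → ((u, m), c) ∈ l →
    (l.map (fun q => if q.1 == (u, m) then ((u, m), c + 1) else q)).foldl pvG acc
      = (l.foldl pvG acc).insert u
          (((l.foldl pvG acc).getD u PySem.Dict.empty).insert m (c + 1)) := by
  induction l with
  | nil => intro _ _ hm; cases hm
  | cons q l ih =>
    intro acc hnd hm
    rw [List.map_cons, List.nodup_cons] at hnd
    rcases List.mem_cons.mp hm with h | h
    · subst h
      have hnone : ∀ q' ∈ l, q'.1 ≠ (u, m) :=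
        fun q' hq' hq1 => hnd.1 (hq1 ▸ List.mem_map_of_mem (f := fun x => x.1) hq')
      rw [List.map_cons]
      simp only [BEq.rfl, if_true]
      have hmap : l.map (fun q => if q.1 == (u, m) then ((u, m), c + 1) else q) = l := by
        apply List.map_congr_left ?_ |>.trans l.map_id
        intro q' hq'
        simp [hnone q' hq']
      rw [hmap, List.foldl_cons, List.foldl_cons]
      have hG : pvG acc ((u, m), c + 1)
          = (pvG acc ((u, m), c)).insert u
              (((pvG acc ((u, m), c)).getD u PySem.Dict.empty).insert m (c + 1)) := by
        simp only [pvG, PySem.Dict.getD_insert_self, PySem.Dict.insert_insert_self,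
          PySem.Dict.insert_insert_self]
      rw [hG]
      exact pv_prop l u m (c + 1) _ (by simp [pvG])
        (by simp [pvG, PySem.Dict.getD_insert_self]) hnone
    · have hq1 : q.1 ≠ (u, m) := by
        intro h1
        exact hnd.1 (h1 ▸ List.mem_map_of_mem (f := fun x => x.1) h)
      have hb : (q.1 == ((u, m) : String × String)) = false := beq_eq_false_iff_ne.mpr hq1
      rw [List.map_cons]
      simp only [hb, Bool.false_eq_true, if_false]
      rw [List.foldl_cons, List.foldl_cons]
      exact ih _ hnd.2 h

-- the key lemma: reshaping after one counter bump = pvF on the reshape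
theorem pv_key (d : PySem.Dict (String × String) Int) (p : String × String)
    (hnd : d.keys.Nodup) :
    ((d.modify p 0 (· + 1)).items).foldl pvG PySem.Dict.empty
      = pvF (d.items.foldl pvG PySem.Dict.empty) p := by
  show ((d.insert p (d.getD p 0 + 1)).items).foldl pvG PySem.Dict.empty = _
  by_cases hc : d.contains p = true
  · obtain ⟨q, hq, hq1⟩ := List.any_eq_true.mp hc
    have hq1' : q.1 = p := by simpa using hq1
    have hmem : (p, q.2) ∈ d.items := by rw [← hq1']; exact hq
    have hgd : d.getD p 0 = q.2 := PySem.Dict.getD_of_mem_items _ hmem hnd 0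
    rw [PySem.Dict.items_insert_of_contains _ _ hc, hgd]
    have := pv_mut d.items p.1 p.2 q.2 PySem.Dict.empty (by exact hnd) (by simpa using hmem)
    simp only [Prod.mk.eta] at this
    rw [this]
    simp only [pvF]
    have : ((d.items.foldl pvG PySem.Dict.empty).getD p.1 PySem.Dict.empty).getD p.2 0
        = q.2 := by
      rw [PySem.Dict.getD_eq_get?_getD,
        pv_lookup_some d.items p.1 p.2 q.2 _ (by exact hnd) (by simpa using hmem)]
      rfl
    rw [this]
  · have hcf : d.contains p = false := by simpa using hc
    rw [PySem.Dict.items_insert_of_not_contains _ _ hcf,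
      PySem.Dict.getD_of_not_contains _ _ hcf, List.foldl_append]
    have hnone : ∀ q' ∈ d.items, q'.1 ≠ p := by
      intro q' hq' h1
      exact hc (List.any_eq_true.mpr ⟨q', hq', by simp [h1]⟩)
    simp only [List.foldl_cons, List.foldl_nil, pvG, pvF]
    have : ((d.items.foldl pvG PySem.Dict.empty).getD p.1 PySem.Dict.empty).getD p.2 0
        = 0 := by
      rw [PySem.Dict.getD_eq_get?_getD,
        pv_lookup_none d.items p.1 p.2 _ (by simpa using hnone), PySem.Dict.getD_empty,
        PySem.Dict.get?_empty]
      rfl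
    rw [this]

-- reshaping Counter(ps) = folding pvF over ps
theorem pv_step2 (ps : List (String × String)) :
    (PySem.Dict.counter ps).items.foldl pvG PySem.Dict.empty
      = ps.foldl pvF PySem.Dict.empty := by
  induction ps using List.reverseRecOn with
  | nil => rfl
  | append_singleton ps p ih =>
    rw [PySem.Dict.counter_append_singleton, List.foldl_append,
      pv_key _ p (PySem.Dict.nodup_keys_counter ps), ih]
    rfl

-- A's loop body with the contains-branching collapsed
theorem pv_stepA_eq (c : PySem.Dict String (PySem.Dict String Int))
    (e : List (String × String)) :
    pvStepA c e
      = if pvGetD e "username" "Unknown" ≠ "" ∧ pvGetD e "modality" "Unknown" ≠ "" then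
          pvF c (pvGetD e "username" "Unknown", pvGetD e "modality" "Unknown")
        else c := by
  simp only [pvStepA]
  split_ifs with h1 h2
  · rfl
  · have hcf : c.contains (pvGetD e "username" "Unknown") = false := by simpa using h2
    rw [PySem.Dict.getD_insert_self, PySem.Dict.insert_insert_self]
    simp only [pvF, PySem.Dict.getD_of_not_contains _ _ hcf]
  · rfl

-- A's loop = folding pvF over the guarded pairs
theorem pv_step1 (events : List (List (String × String))) :
    ∀ (acc : PySem.Dict String (PySem.Dict String Int)),
    events.foldl pvStepA acc = (pvPairs events).foldl pvF acc := by
  induction events with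
  | nil => intro acc; rfl
  | cons e es ih =>
    intro acc
    rw [List.foldl_cons, pv_stepA_eq, ih]
    simp only [pvPairs, List.map_cons, List.filter_cons]
    by_cases h : pvGetD e "username" "Unknown" ≠ "" ∧ pvGetD e "modality" "Unknown" ≠ ""
    · rw [if_pos h, if_pos (by simpa using h : (decide (pvGetD e "username" "Unknown" ≠ "" ∧
        pvGetD e "modality" "Unknown" ≠ "")) = true), List.foldl_cons]
    · rw [if_neg h, if_neg (by simpa using h : ¬ (decide (pvGetD e "username" "Unknown" ≠ "" ∧
        pvGetD e "modality" "Unknown" ≠ "")) = true)]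

-- B's reshape body with setdefault collapsed
theorem pv_stepB_eq (r : PySem.Dict String (PySem.Dict String Int))
    (qc : (String × String) × Int) : pvStepB r qc = pvG r qc := by
  simp only [pvStepB, pvG]
  by_cases hc : r.contains qc.1.1 = true
  · rw [PySem.Dict.setdefault_of_contains _ _ hc]
  · have hcf : r.contains qc.1.1 = false := by simpa using hc
    rw [PySem.Dict.setdefault_of_not_contains _ _ hcf, PySem.Dict.getD_insert_self,
      PySem.Dict.insert_insert_self, PySem.Dict.getD_of_not_contains _ _ hcf]

theorem pv_final (events : List (List (String × String))) :
    (events.foldl pvStepA PySem.Dict.empty).items.map (fun p => (p.1, p.2.items))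
      = ((PySem.Dict.counter (pvPairs events)).items.foldl pvStepB
          PySem.Dict.empty).items.map (fun p => (p.1, p.2.items)) := by
  have hfg : pvStepB = pvG := funext (fun r => funext (fun qc => pv_stepB_eq r qc))
  rw [hfg, pv_step2, pv_step1]

-- ===== VERDICT (by name: the statement is the Claim_ definition above) =====
theorem aggregate_by_user_modality_spec : Claim_equal_aggregate_by_user_modality := by
  intro events _
  unfold Spec_aggregate_by_user_modality aggregate_by_user_modality
    aggregate_by_user_modality_alt
  exact pv_final events
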